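-- pv_equiv track=rewrite | github.com/umegan/mlab-pages | tmp/add_ipsj88_csv.py | split_non_empty_blocks
-- ===== SOURCE A (Python) =====
-- def split_non_empty_blocks(lines: list[str]) -> list[list[str]]:
--     blocks: list[list[str]] = []
--     current: list[str] = []
--     for line in lines:
--         if line.strip():
--             current.append(line)
--             continue
--         if current:
--             blocks.append(current)
--             current = []
--     if current:
--         blocks.append(current)
--     return blocks
-- ===== SOURCE B (Python) =====
-- from itertools import groupby
--
--
-- def split_non_empty_blocks(lines: list[str]) -> list[list[str]]:
--     return [list(group) for key, group in groupby(lines, key=lambda l: bool(l.strip())) if key]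
-- ===== Notes on version B (the rewrite author's own statement) =====
-- stated objective: idiomatic
-- what changed: Replaces the explicit accumulator-and-flush loop with itertools.groupby on line truthiness plus a filtering comprehension.
import Mathlib
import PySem

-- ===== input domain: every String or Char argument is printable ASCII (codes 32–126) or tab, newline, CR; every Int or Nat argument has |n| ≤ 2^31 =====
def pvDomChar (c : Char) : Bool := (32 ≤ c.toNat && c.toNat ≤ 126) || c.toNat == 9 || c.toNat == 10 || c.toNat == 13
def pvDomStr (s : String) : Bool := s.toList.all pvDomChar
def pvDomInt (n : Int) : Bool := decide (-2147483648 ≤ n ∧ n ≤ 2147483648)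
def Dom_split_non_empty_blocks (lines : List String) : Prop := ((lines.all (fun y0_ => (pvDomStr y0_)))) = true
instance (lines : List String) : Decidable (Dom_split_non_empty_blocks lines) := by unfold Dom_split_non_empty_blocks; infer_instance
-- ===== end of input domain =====

-- B replaces A's explicit accumulator-and-flush loop with a grouping pass (maximal runs of
-- equal line truthiness, itertools.groupby in Source B) plus filtering; objective: idiomatic.

-- Python truthiness of line.strip(): shared test of both ports
def nonblank (line : String) : Bool := PySem.Str.strip line ≠ ""

-- ===== PORT A =====
-- A's loop, carrying the state (blocks, current); after the loop the pending block is flushed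
def splitA_go (lines : List String) (blocks : List (List String)) (current : List String) :
    List (List String) :=
  match lines with
  | [] => if current.isEmpty then blocks else blocks ++ [current]
  | line :: rest =>
      if nonblank line then splitA_go rest blocks (current ++ [line])
      else if current.isEmpty then splitA_go rest blocks []
      else splitA_go rest (blocks ++ [current]) []

def split_non_empty_blocks (lines : List String) : List (List String) :=
  splitA_go lines [] []

-- ===== PORT B =====
-- Source B's groupby(lines, key=λ l: bool(l.strip())): maximal runs of equal truthiness, keeping
-- the runs whose key is True; a True run is head :: takeWhile nonblank, a False run is skipped.
def splitB_go (lines : List String) : List (List String) :=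
  match lines with
  | [] => []
  | line :: rest =>
      if nonblank line then
        (line :: rest.takeWhile nonblank) :: splitB_go (rest.dropWhile nonblank)
      else
        splitB_go (rest.dropWhile (fun l => !nonblank l))
termination_by lines.length
decreasing_by
  · exact Nat.lt_succ_of_le (List.dropWhile_sublist _).length_le
  · exact Nat.lt_succ_of_le (List.dropWhile_sublist _).length_le

def split_non_empty_blocks_alt (lines : List String) : List (List String) :=
  splitB_go lines

-- ===== PRECONDITION & SPEC =====
def Spec_split_non_empty_blocks (lines : List String) (out : List (List String)) : Prop := out = split_non_empty_blocks_alt lines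
instance (lines : List String) (out : List (List String)) : Decidable (Spec_split_non_empty_blocks lines out) := by unfold Spec_split_non_empty_blocks; infer_instance

-- ===== CLAIM (what is proved, stated in full; the proofs are below) =====
def Claim_equal_split_non_empty_blocks : Prop := ∀ (lines : List String), Dom_split_non_empty_blocks lines → Spec_split_non_empty_blocks lines (split_non_empty_blocks lines)

-- ===== LEMMAS AND PROOFS =====

-- the already-emitted blocks factor out of A's loop
theorem splitA_go_append (lines : List String) (blocks : List (List String))
    (current : List String) :
    splitA_go lines blocks current = blocks ++ splitA_go lines [] current := by
  induction lines generalizing blocks current with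
  | nil => simp only [splitA_go]; split <;> simp
  | cons line rest ih =>
      simp only [splitA_go]
      split
      · rw [ih blocks, ih []]
      · split
        · rw [ih blocks, ih []]
        · rw [ih (blocks ++ [current]), ih ([] ++ [current])]
          simp

-- with empty accumulator A's loop skips leading blank lines
theorem splitA_go_dropWhile (lines : List String) :
    splitA_go lines [] [] =
      splitA_go (lines.dropWhile (fun l => !nonblank l)) [] [] := by
  induction lines with
  | nil => rfl
  | cons line rest ih =>
      by_cases h : nonblank line = true
      · simp [h]
      · rw [Bool.not_eq_true] at h
        simp only [splitA_go, h, Bool.false_eq_true, if_false, List.isEmpty_nil,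
          List.dropWhile_cons, Bool.not_false, if_pos]
        exact ih

-- main invariant: A's loop from state ([], current) computes B's grouping
theorem splitA_go_eq (n : ℕ) :
    ∀ lines : List String, lines.length ≤ n →
      (splitA_go lines [] [] = splitB_go lines) ∧
      (∀ current : List String, current ≠ [] →
        splitA_go lines [] current =
          (current ++ lines.takeWhile nonblank)
            :: splitB_go (lines.dropWhile nonblank)) := by
  induction n with
  | zero =>
      intro lines hlen
      have : lines = [] := List.eq_nil_of_length_eq_zero (Nat.le_zero.mp hlen)
      subst this
      refine ⟨by simp [splitA_go, splitB_go], ?_⟩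
      intro current hc
      match current with
      | c :: cs => simp [splitA_go, splitB_go]
  | succ n ih =>
      intro lines hlen
      match lines with
      | [] =>
          refine ⟨by simp [splitA_go, splitB_go], ?_⟩
          intro current hc
          match current with
          | c :: cs => simp [splitA_go, splitB_go]
      | line :: rest =>
          have hrest : rest.length ≤ n := Nat.le_of_succ_le_succ hlen
          by_cases h : nonblank line = true
          · constructor
            · have h2 := (ih rest hrest).2 [line] (by simp)
              simp only [splitA_go, splitB_go, h, if_true]
              rw [show ([] : List String) ++ [line] = [line] from rfl, h2]
              simp
            · intro current hc
              have h2 := (ih rest hrest).2 (current ++ [line]) (by simp)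
              simp only [splitA_go, h, if_true]
              rw [h2]
              simp [h]
          · rw [Bool.not_eq_true] at h
            have hdw : splitB_go rest =
                splitB_go (rest.dropWhile (fun l => !nonblank l)) := by
              have h1 := (ih rest hrest).1
              have h1' := (ih (rest.dropWhile (fun l => !nonblank l))
                (le_trans (List.dropWhile_sublist _).length_le hrest)).1
              rw [← h1, ← h1', splitA_go_dropWhile rest]
            constructor
            · have h1 := (ih rest hrest).1
              simp only [splitA_go, splitB_go, h, Bool.false_eq_true, if_false,
                List.isEmpty_nil, if_true]
              rw [h1, hdw]
            · intro current hc
              have h1 := (ih rest hrest).1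
              match current with
              | c :: cs =>
                simp only [splitA_go, splitB_go, h, Bool.false_eq_true, if_false,
                  List.isEmpty_cons, List.takeWhile_cons, List.dropWhile_cons,
                  List.nil_append]
                rw [splitA_go_append rest [c :: cs] [], h1, hdw]
                simp

-- ===== VERDICT (by name: the statement is the Claim_ definition above) =====
theorem split_non_empty_blocks_spec : Claim_equal_split_non_empty_blocks := by
  intro lines _
  show split_non_empty_blocks lines = split_non_empty_blocks_alt lines
  exact (splitA_go_eq lines.length lines le_rfl).1
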